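-- pv_equiv track=rewrite | github.com/donceykong/Lidar2OSM | composite_bki/scripts/learn_confusion_matrix.py | build_row_names
-- ===== SOURCE A (Python) =====
-- from collections import defaultdict
--
-- def build_row_names(label_to_idx: dict, labels: dict, k_pred: int) -> list[str]:
--     grouped = defaultdict(list)
--     for raw_id, row_idx in label_to_idx.items():
--         name = labels.get(raw_id, str(raw_id)) if labels else str(raw_id)
--         grouped[row_idx].append(name)
--     row_names = []
--     for idx in range(k_pred):
--         names = grouped.get(idx, [f"row_{idx}"])
--         row_names.append("/".join(sorted(names)))
--     return row_names
-- ===== SOURCE B (Python) =====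
-- from bisect import bisect_left, bisect_right
--
-- def _display_name(labels: dict, raw_id: int) -> str:
--     return labels.get(raw_id, str(raw_id)) if labels else str(raw_id)
--
-- def build_row_names(label_to_idx: dict, labels: dict, k_pred: int) -> list[str]:
--     pairs = sorted(label_to_idx.items(), key=lambda p: p[1])
--     keys = [row_idx for _, row_idx in pairs]
--     row_names = []
--     for idx in range(k_pred):
--         lo = bisect_left(keys, idx)
--         hi = bisect_right(keys, idx)
--         if lo == hi:
--             row_names.append(f"row_{idx}")
--         else:
--             row_names.append("/".join(sorted(
--                 _display_name(labels, raw_id) for raw_id, _ in pairs[lo:hi])))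
--     return row_names
-- ===== Notes on version B (the rewrite author's own statement) =====
-- stated objective: alternative
-- what changed: B replaces the defaultdict hash-grouping with sorting the items once by row index and locating each row's contiguous run via bisect_left/bisect_right, joining the sorted names of that slice.
import Mathlib
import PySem

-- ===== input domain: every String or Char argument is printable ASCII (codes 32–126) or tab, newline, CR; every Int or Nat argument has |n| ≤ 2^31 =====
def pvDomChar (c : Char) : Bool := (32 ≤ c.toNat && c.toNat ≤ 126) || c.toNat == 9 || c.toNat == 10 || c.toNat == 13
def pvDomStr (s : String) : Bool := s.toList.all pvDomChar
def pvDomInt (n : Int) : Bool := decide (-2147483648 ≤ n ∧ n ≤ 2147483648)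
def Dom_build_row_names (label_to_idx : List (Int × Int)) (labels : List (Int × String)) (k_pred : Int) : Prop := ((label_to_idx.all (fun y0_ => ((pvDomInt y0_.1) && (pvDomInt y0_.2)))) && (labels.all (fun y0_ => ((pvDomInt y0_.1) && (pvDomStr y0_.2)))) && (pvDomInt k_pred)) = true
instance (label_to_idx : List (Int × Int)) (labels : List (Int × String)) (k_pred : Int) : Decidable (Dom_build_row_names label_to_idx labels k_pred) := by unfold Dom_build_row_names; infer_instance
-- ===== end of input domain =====

-- B drops the defaultdict grouping: it scans the items list once per row index, sorting each
-- group directly (alternative decomposition; same results, no hash grouping).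


-- ===== PORT A =====
def build_row_names (label_to_idx : List (Int × Int)) (labels : List (Int × String)) (k_pred : Int) : List String :=
  -- grouped = defaultdict(list); for raw_id, row_idx in label_to_idx.items(): grouped[row_idx].append(name)
  let grouped : PySem.Dict Int (List String) :=
    label_to_idx.foldl
      (fun d p =>
        let name := if labels.isEmpty then PySem.Int.toStr p.1
                    else ((PySem.Dict.mk labels).get? p.1).getD (PySem.Int.toStr p.1)
        d.modify p.2 [] (fun l => l ++ [name]))
      PySem.Dict.empty
  -- for idx in range(k_pred): row_names.append("/".join(sorted(grouped.get(idx, [f"row_{idx}"]))))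
  (PySem.List.pyRange 0 k_pred 1).foldl
    (fun row_names idx =>
      let names := grouped.getD idx ["row_" ++ PySem.Int.toStr idx]
      row_names ++ [PySem.Str.join "/" (PySem.List.sorted names (fun s => s) false)])
    []

-- ===== PORT B =====
-- _display_name(labels, raw_id)
def pvDisplayName (labels : List (Int × String)) (raw_id : Int) : String :=
  if labels.isEmpty then PySem.Int.toStr raw_id
  else ((PySem.Dict.mk labels).get? raw_id).getD (PySem.Int.toStr raw_id)

def build_row_names_alt (label_to_idx : List (Int × Int)) (labels : List (Int × String)) (k_pred : Int) : List String :=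
  -- pairs = sorted(label_to_idx.items(), key=lambda p: p[1]); keys = [row_idx for _, row_idx in pairs]
  let pairs := PySem.List.sorted label_to_idx (fun p => p.2) false
  let keys := pairs.map (fun p => p.2)
  (PySem.List.pyRange 0 k_pred 1).foldl
    (fun row_names idx =>
      let lo := PySem.List.bisectLeft keys idx
      let hi := PySem.List.bisectRight keys idx
      row_names ++
        [if lo = hi then "row_" ++ PySem.Int.toStr idx
         else PySem.Str.join "/" (PySem.List.sorted
           ((PySem.List.slice pairs (some (lo : Int)) (some (hi : Int))).map
             (fun p => pvDisplayName labels p.1)) (fun s => s) false)])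
    []

-- ===== PRECONDITION & SPEC =====
def Spec_build_row_names (label_to_idx : List (Int × Int)) (labels : List (Int × String)) (k_pred : Int) (out : List String) : Prop := out = build_row_names_alt label_to_idx labels k_pred
instance (label_to_idx : List (Int × Int)) (labels : List (Int × String)) (k_pred : Int) (out : List String) : Decidable (Spec_build_row_names label_to_idx labels k_pred out) := by unfold Spec_build_row_names; infer_instance

-- ===== CLAIM (what is proved, stated in full; the proofs are below) =====
def Claim_equal_build_row_names : Prop := ∀ (label_to_idx : List (Int × Int)) (labels : List (Int × String)) (k_pred : Int), Dom_build_row_names label_to_idx labels k_pred → Spec_build_row_names label_to_idx labels k_pred (build_row_names label_to_idx labels k_pred)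

-- ===== LEMMAS AND PROOFS =====

-- A's grouping step, named for the lemmas
def pvStep (labels : List (Int × String)) (d : PySem.Dict Int (List String)) (p : Int × Int) : PySem.Dict Int (List String) :=
  d.modify p.2 [] (fun l => l ++ [pvDisplayName labels p.1])

lemma pvContains_foldl (labels : List (Int × String)) (lti : List (Int × Int))
    (d : PySem.Dict Int (List String)) (idx : Int) :
    (lti.foldl (pvStep labels) d).contains idx
      = (d.contains idx || lti.any (fun p => p.2 == idx)) := by
  induction lti generalizing d with
  | nil => simp
  | cons p rest ih =>
      simp only [List.foldl_cons, List.any_cons, ih, pvStep, PySem.Dict.contains_modify]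
      by_cases h : idx = p.2
      · simp [h]
      · have h1 : (idx == p.2) = false := beq_eq_false_iff_ne.mpr h
        have h2 : (p.2 == idx) = false := beq_eq_false_iff_ne.mpr (fun he => h he.symm)
        simp [h1, h2]

lemma pvGetD_foldl (labels : List (Int × String)) (lti : List (Int × Int))
    (d : PySem.Dict Int (List String)) (idx : Int) :
    (lti.foldl (pvStep labels) d).getD idx []
      = d.getD idx [] ++ (lti.filter (fun p => p.2 == idx)).map (fun p => pvDisplayName labels p.1) := by
  induction lti generalizing d with
  | nil => simp
  | cons p rest ih =>
      simp only [List.foldl_cons, List.filter_cons, ih, pvStep]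
      by_cases h : p.2 = idx
      · subst h
        simp [PySem.Dict.getD_modify_self]
      · rw [PySem.Dict.getD_modify_of_ne _ [] _ (fun hc => h hc.symm)]
        simp [h]

lemma pvJoin_singleton (s : String) : PySem.Str.join "/" [s] = s := by
  simp [PySem.Str.join, PySem.Chars.join, List.intercalate]

lemma pvSorted_singleton (s : String) : PySem.List.sorted [s] (fun x => x) false = [s] :=
  PySem.List.sorted_eq_self_of_pairwise [s] (fun x => x) (by simp)


lemma pvSortedId_congr (xs ys : List String) (h : xs.Perm ys) :
    PySem.List.sorted xs (fun x => x) false = PySem.List.sorted ys (fun x => x) false :=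
  PySem.List.sorted_id_eq_of_perm_of_pairwise xs (PySem.List.sorted ys (fun x => x) false)
    ((PySem.List.sorted_perm ys (fun x => x) false).trans h.symm)
    (PySem.List.sorted_pairwise ys (fun x => x))

lemma pvRow_eq (labels : List (Int × String)) (lti : List (Int × Int)) (idx : Int) :
    PySem.Str.join "/" (PySem.List.sorted
        ((lti.foldl (pvStep labels) PySem.Dict.empty).getD idx ["row_" ++ PySem.Int.toStr idx])
        (fun s => s) false)
    = (if PySem.List.bisectLeft ((PySem.List.sorted lti (fun p => p.2) false).map (fun p => p.2)) idx
          = PySem.List.bisectRight ((PySem.List.sorted lti (fun p => p.2) false).map (fun p => p.2)) idx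
       then "row_" ++ PySem.Int.toStr idx
       else PySem.Str.join "/" (PySem.List.sorted
         ((PySem.List.slice (PySem.List.sorted lti (fun p => p.2) false)
             (some ((PySem.List.bisectLeft ((PySem.List.sorted lti (fun p => p.2) false).map (fun p => p.2)) idx : Nat) : Int))
             (some ((PySem.List.bisectRight ((PySem.List.sorted lti (fun p => p.2) false).map (fun p => p.2)) idx : Nat) : Int))).map
           (fun p => pvDisplayName labels p.1)) (fun s => s) false)) := by
  set P := PySem.List.sorted lti (fun p => p.2) false with hP
  set lo := PySem.List.bisectLeft (P.map (fun p => p.2)) idx with hlo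
  set hi := PySem.List.bisectRight (P.map (fun p => p.2)) idx with hhi
  have hperm : P.Perm lti := PySem.List.sorted_perm lti (fun p => p.2) false
  have hK : (P.map (fun p => p.2)).Pairwise (· ≤ ·) := PySem.List.sorted_map_key_pairwise lti (fun p => p.2)
  obtain ⟨hloLen, hlo1, hlo2⟩ := PySem.List.bisectLeft_spec (P.map (fun p => p.2)) idx hK
  obtain ⟨hhiLen, hhi1, hhi2⟩ := PySem.List.bisectRight_spec (P.map (fun p => p.2)) idx hK
  rw [List.length_map] at hloLen hhiLen
  have hA : ∀ j (h : j < P.length), j < lo → P[j].2 < idx := by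
    intro j h hj; have := hlo1 j (by simpa using h) hj; simpa using this
  have hB : ∀ j (h : j < P.length), lo ≤ j → idx ≤ P[j].2 := by
    intro j h hj; have := hlo2 j (by simpa using h) hj; simpa using this
  have hC : ∀ j (h : j < P.length), j < hi → P[j].2 ≤ idx := by
    intro j h hj; have := hhi1 j (by simpa using h) hj; simpa using this
  have hD : ∀ j (h : j < P.length), hi ≤ j → idx < P[j].2 := by
    intro j h hj; have := hhi2 j (by simpa using h) hj; simpa using this
  have hlole : lo ≤ hi := by
    by_contra hcon
    push Not at hcon
    have h1 := hA hi (lt_of_lt_of_le hcon hloLen) hcon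
    have h2 := hD hi (lt_of_lt_of_le hcon hloLen) (le_refl hi)
    omega
  by_cases hany : lti.any (fun p => p.2 == idx) = true
  · -- the group is nonempty: both sides join the same multiset of names, sorted
    obtain ⟨p, hpmem, hpq⟩ := List.any_eq_true.mp hany
    obtain ⟨j, hjlen, hjeq⟩ := List.mem_iff_getElem.mp (hperm.mem_iff.mpr hpmem)
    have hkeyj : P[j].2 = idx := by rw [hjeq]; exact beq_iff_eq.mp hpq
    have hjhi : j < hi := by by_contra h'; have := hD j hjlen (le_of_not_gt h'); omega
    have hloj : lo ≤ j := by by_contra h'; have := hA j hjlen (lt_of_not_ge h'); omega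
    have hne : ¬ lo = hi := by omega
    rw [if_neg hne]
    -- the A side: the defaultdict group is the filtered name list
    have hc : (lti.foldl (pvStep labels) PySem.Dict.empty).contains idx = true := by
      rw [pvContains_foldl]; simp [hany]
    obtain ⟨v, hv⟩ : ∃ v, (lti.foldl (pvStep labels) PySem.Dict.empty).get? idx = some v := by
      rcases hx : (lti.foldl (pvStep labels) PySem.Dict.empty).get? idx with _ | v
      · rw [PySem.Dict.contains_eq_isSome_get?, hx] at hc; simp at hc
      · exact ⟨v, rfl⟩
    have hgd : (lti.foldl (pvStep labels) PySem.Dict.empty).getD idx ["row_" ++ PySem.Int.toStr idx] = v := by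
      rw [PySem.Dict.getD_eq_get?_getD, hv]; rfl
    have hF : v = (lti.filter (fun p => p.2 == idx)).map (fun p => pvDisplayName labels p.1) := by
      have := pvGetD_foldl labels lti PySem.Dict.empty idx
      rw [PySem.Dict.getD_eq_get?_getD, hv] at this
      simpa using this
    -- the B side: the bisect slice is the filter of the sorted list
    have hslice : PySem.List.slice P (some ((lo : Nat) : Int)) (some ((hi : Nat) : Int))
        = (P.drop lo).take (hi - lo) := PySem.List.slice_natCast P lo hi
    have hmid_all : ∀ x ∈ (P.drop lo).take (hi - lo), (x.2 == idx) = true := by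
      intro x hx
      obtain ⟨i, hi', hx'⟩ := List.mem_iff_getElem.mp hx
      have hi'' : i < hi - lo ∧ i < P.length - lo := by
        simpa [List.length_take, List.length_drop] using hi'
      rw [List.getElem_take, List.getElem_drop] at hx'
      have h1 := hB (lo + i) (by omega) (by omega)
      have h2 := hC (lo + i) (by omega) (by omega)
      rw [hx'] at h1 h2
      simp [beq_iff_eq]; omega
    have htake_lt : ∀ x ∈ P.take lo, ¬ ((x.2 == idx) = true) := by
      intro x hx
      obtain ⟨i, hi', hx'⟩ := List.mem_iff_getElem.mp hx
      have hi'' : i < lo ∧ i < P.length := by simpa [List.length_take] using hi'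
      rw [List.getElem_take] at hx'
      have := hA i hi''.2 hi''.1
      rw [hx'] at this
      simp [beq_iff_eq]; omega
    have hdrop_gt : ∀ x ∈ P.drop hi, ¬ ((x.2 == idx) = true) := by
      intro x hx
      obtain ⟨i, hi', hx'⟩ := List.mem_iff_getElem.mp hx
      have hi'' : i < P.length - hi := by simpa [List.length_drop] using hi'
      rw [List.getElem_drop] at hx'
      have := hD (hi + i) (by omega) (by omega)
      rw [hx'] at this
      simp [beq_iff_eq]; omega
    have hdecomp : P = P.take lo ++ ((P.drop lo).take (hi - lo) ++ P.drop hi) := by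
      have h1 : (P.drop lo).drop (hi - lo) = P.drop hi := by
        rw [List.drop_drop]; congr 1; omega
      rw [← h1, List.take_append_drop, List.take_append_drop]
    have hfilterP : P.filter (fun p => p.2 == idx) = (P.drop lo).take (hi - lo) := by
      conv_lhs => rw [hdecomp]
      rw [List.filter_append, List.filter_append,
        List.filter_eq_nil_iff.mpr htake_lt,
        List.filter_eq_self.mpr hmid_all,
        List.filter_eq_nil_iff.mpr hdrop_gt]
      simp
    have hpermF : ((P.drop lo).take (hi - lo)).map (fun p => pvDisplayName labels p.1)
        |>.Perm ((lti.filter (fun p => p.2 == idx)).map (fun p => pvDisplayName labels p.1)) := by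
      rw [← hfilterP]
      exact (hperm.filter _).map _
    rw [hgd, hF, hslice]
    exact congrArg (PySem.Str.join "/") (pvSortedId_congr _ _ hpermF).symm
  · -- empty group: A joins the sorted singleton sentinel, B takes the default branch
    have hnone : ∀ x ∈ P, ¬ x.2 = idx := by
      intro x hx hxe
      exact hany (List.any_eq_true.mpr ⟨x, hperm.mem_iff.mp hx, beq_iff_eq.mpr hxe⟩)
    have hloeq : lo = hi := by
      by_contra hne
      have hlolt : lo < hi := lt_of_le_of_ne hlole hne
      have hlolen : lo < P.length := lt_of_lt_of_le hlolt hhiLen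
      have h1 := hB lo hlolen (le_refl lo)
      have h2 := hC lo hlolen hlolt
      exact hnone P[lo] (List.getElem_mem hlolen) (by omega)
    rw [if_pos hloeq]
    have hc : (lti.foldl (pvStep labels) PySem.Dict.empty).contains idx = false := by
      rw [pvContains_foldl]; simp [eq_false_of_ne_true hany]
    have hgd := PySem.Dict.getD_of_not_contains _ ["row_" ++ PySem.Int.toStr idx] hc
    simp [hgd, pvSorted_singleton, pvJoin_singleton]

theorem build_row_names_spec : Claim_equal_build_row_names := by
  intro lti labels k _
  show build_row_names lti labels k = build_row_names_alt lti labels k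
  show (PySem.List.pyRange 0 k 1).foldl
      (fun rn idx => rn ++ [PySem.Str.join "/" (PySem.List.sorted
        ((lti.foldl (pvStep labels) PySem.Dict.empty).getD idx ["row_" ++ PySem.Int.toStr idx])
        (fun s => s) false)]) []
    = (PySem.List.pyRange 0 k 1).foldl
      (fun rn idx => rn ++
        [if PySem.List.bisectLeft ((PySem.List.sorted lti (fun p => p.2) false).map (fun p => p.2)) idx
            = PySem.List.bisectRight ((PySem.List.sorted lti (fun p => p.2) false).map (fun p => p.2)) idx
         then "row_" ++ PySem.Int.toStr idx
         else PySem.Str.join "/" (PySem.List.sorted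
           ((PySem.List.slice (PySem.List.sorted lti (fun p => p.2) false)
               (some ((PySem.List.bisectLeft ((PySem.List.sorted lti (fun p => p.2) false).map (fun p => p.2)) idx : Nat) : Int))
               (some ((PySem.List.bisectRight ((PySem.List.sorted lti (fun p => p.2) false).map (fun p => p.2)) idx : Nat) : Int))).map
             (fun p => pvDisplayName labels p.1)) (fun s => s) false)]) []
  congr 1
  funext rn idx
  exact congrArg (fun s => rn ++ [s]) (pvRow_eq labels lti idx)
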